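-- pv_equiv track=rewrite | github.com/wastu01/Tesseract_OCR_Practices | index.py | get_bin_table
-- ===== SOURCE A (Python) =====
-- def get_bin_table(threshold=95):
--     # 0表示黑色,1表示白色 binary
--     # 闕值二值化
--
--     table = []
--     for i in range(256):
--         if i < threshold:
--             table.append(0)
--         else:
--             table.append(1)
--     return table
-- ===== SOURCE B (Python) =====
-- def get_bin_table(threshold=95):
--     # closed-form split: n leading zeros, then ones
--     n = min(256, max(0, threshold))
--     return [0] * n + [1] * (256 - n)
-- ===== Notes on version B (the rewrite author's own statement) =====
-- stated objective: simpler
-- what changed: Replaces the per-element comparison loop over the table indices with a closed-form split: clamp the threshold to the table length and concatenate a replicated zero block with a replicated one block.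
import Mathlib
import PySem

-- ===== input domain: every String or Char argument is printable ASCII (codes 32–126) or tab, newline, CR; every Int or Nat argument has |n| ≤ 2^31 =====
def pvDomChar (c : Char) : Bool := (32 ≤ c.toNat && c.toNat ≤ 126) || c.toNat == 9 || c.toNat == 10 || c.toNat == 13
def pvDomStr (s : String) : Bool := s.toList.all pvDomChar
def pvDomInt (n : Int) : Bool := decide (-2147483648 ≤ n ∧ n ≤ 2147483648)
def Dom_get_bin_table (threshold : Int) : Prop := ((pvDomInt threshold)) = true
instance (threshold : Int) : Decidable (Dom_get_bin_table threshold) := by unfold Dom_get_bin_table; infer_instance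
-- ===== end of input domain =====

-- ===== PORT A =====
-- Port of A: loop i in range(256), append 0/1 by comparison.
def get_bin_table (threshold : Int) : List Int :=
  (PySem.List.pyRange 0 256 1).foldl
    (fun table i => table ++ [if i < threshold then 0 else 1]) []

-- ===== PORT B =====
-- Port of B: clamped closed-form split into a zero block and a one block.
def get_bin_table_alt (threshold : Int) : List Int :=
  List.replicate (min 256 (max 0 threshold)).toNat 0
    ++ List.replicate (256 - (min 256 (max 0 threshold)).toNat) 1

-- ===== PRECONDITION & SPEC =====
def Spec_get_bin_table (threshold : Int) (out : List Int) : Prop := out = get_bin_table_alt threshold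
instance (threshold : Int) (out : List Int) : Decidable (Spec_get_bin_table threshold out) := by unfold Spec_get_bin_table; infer_instance

-- ===== CLAIM (what is proved, stated in full; the proofs are below) =====
def Claim_equal_get_bin_table : Prop := ∀ (threshold : Int), Dom_get_bin_table threshold → Spec_get_bin_table threshold (get_bin_table threshold)

-- ===== LEMMAS AND PROOFS =====

-- ===== VERDICT (by name: the statement is the Claim_ definition above) =====
-- the loop is a map over the range
lemma foldl_append_map (t : Int) (l : List Int) (acc : List Int) :
    l.foldl (fun table i => table ++ [if i < t then 0 else 1]) acc
      = acc ++ l.map (fun i => if i < t then 0 else 1) := by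
  induction l generalizing acc with
  | nil => simp
  | cons x xs ih => simp [List.foldl, ih]

-- closed form of the comparison map over range m (m ≤ 256), by induction on m
lemma map_range_split (t : Int) (m : Nat) (hm : m ≤ 256) :
    (List.range m).map (fun (k : Nat) => if (k : Int) < t then (0:Int) else 1)
      = List.replicate (min m (min 256 (max 0 t)).toNat) 0
        ++ List.replicate (m - min m (min 256 (max 0 t)).toNat) 1 := by
  induction m with
  | zero => simp
  | succ m ih =>
    rw [List.range_succ, List.map_append, ih (by omega)]
    by_cases h : (m : Int) < t
    · have h1 : min m (min 256 (max 0 t)).toNat = m := by omega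
      have h2 : min (m + 1) (min 256 (max 0 t)).toNat = m + 1 := by omega
      have h3 : m - m = 0 := by omega
      simp only [h1, h2, h3, if_pos h, List.map_cons, List.map_nil,
        List.replicate_zero, List.append_nil, List.replicate_succ']
      simp
    · have h1 : min m (min 256 (max 0 t)).toNat = (min 256 (max 0 t)).toNat := by omega
      have h2 : min (m + 1) (min 256 (max 0 t)).toNat = (min 256 (max 0 t)).toNat := by
        omega
      have h3 : m + 1 - (min 256 (max 0 t)).toNat
          = (m - (min 256 (max 0 t)).toNat) + 1 := by omega
      simp only [h1, h2, h3, if_neg h, List.map_cons, List.map_nil,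
        List.append_assoc]
      rw [← List.replicate_succ']

theorem get_bin_table_spec : Claim_equal_get_bin_table := by
  intro t _
  unfold Spec_get_bin_table get_bin_table get_bin_table_alt
  rw [PySem.List.pyRange_one, foldl_append_map, List.map_map]
  have : ((fun i => if i < t then (0:Int) else 1) ∘ fun k : Nat => (0:Int) + k)
      = fun (k : Nat) => if (k : Int) < t then (0:Int) else 1 := by
    funext k; simp
  rw [show ((256:Int) - 0).toNat = 256 by decide, this,
    map_range_split t 256 (le_refl _)]
  simp
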